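-- pv_equiv track=rewrite | github.com/guilopesrbc/listasP1 | lista05/01.py | contagem_barra_2
-- ===== SOURCE A (Python) =====
-- def contagem_barra_2(ep,x):
--     # caso seja o ultimo termo
--     if x == (len(ep) - 1):
--         # caso base
--         if ep[x] != ')':
--             return 0
--         else:
--             return 1
--     else:
--         if ep[x] != ')':
--             return 0 + contagem_barra_2(ep,x+1)
--         else:
--             return 1 + contagem_barra_2(ep,x+1)
-- ===== SOURCE B (Python) =====
-- def contagem_barra_2(ep, x):
--     return ep[x:].count(')')
-- ===== Notes on version B (the rewrite author's own statement) =====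
-- stated objective: simpler
-- what changed: Replaces the element-by-element recursion with a single slice-and-count (ep[x:].count(')')), removing the recursion entirely.
-- intended difference: For negative x with -len(ep) <= x < 0 and ')' present in ep, A's negative-index wraparound makes it count the tail ep[x:] and then the whole string again (tail count + whole count), while B returns the intended count of ')' in ep[x:] only. — e.g. on contagem_barra_2(")a", -1): A returns 1, B returns 0
import Mathlib
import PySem

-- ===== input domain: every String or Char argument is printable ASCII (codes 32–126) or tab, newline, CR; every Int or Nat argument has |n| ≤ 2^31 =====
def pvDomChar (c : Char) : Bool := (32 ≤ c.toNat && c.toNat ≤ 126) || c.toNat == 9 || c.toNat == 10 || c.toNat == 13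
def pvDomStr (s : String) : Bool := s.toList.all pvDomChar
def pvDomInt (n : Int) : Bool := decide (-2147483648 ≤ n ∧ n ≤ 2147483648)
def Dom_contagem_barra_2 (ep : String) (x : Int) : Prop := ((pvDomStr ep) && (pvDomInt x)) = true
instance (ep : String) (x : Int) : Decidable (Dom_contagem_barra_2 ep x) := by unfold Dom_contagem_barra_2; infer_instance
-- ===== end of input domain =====

-- B replaces A's element-by-element recursion with a single slice-and-count; on negative x
-- A's wraparound double-counts the whole string (stated as D_), and where A raises IndexError
-- B returns the count over the (empty/clamped) slice.

-- ===== PORT A =====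
-- fuel makes the recursion total; 2*len+1 steps suffice on every input A returns on
def pvGoA (ep : List Char) (fuel : Nat) (x : Int) : Int :=
  match fuel with
  | 0 => 0
  | fuel + 1 =>
    if x = (ep.length : Int) - 1 then
      match PySem.List.pyGet? ep x with
      | some c => if c ≠ ')' then 0 else 1
      | none => 0
    else
      match PySem.List.pyGet? ep x with
      | some c => (if c ≠ ')' then 0 else 1) + pvGoA ep fuel (x + 1)
      | none => 0

def contagem_barra_2 (ep : String) (x : Int) : Int :=
  pvGoA ep.toList (2 * ep.toList.length + 1) x

-- ===== PORT B =====
def contagem_barra_2_alt (ep : String) (x : Int) : Int :=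
  ((PySem.List.slice ep.toList (some x) none).count ')' : Int)

-- ===== PRECONDITION & SPEC =====
def Pre_contagem_barra_2 (ep : String) (x : Int) : Prop :=
  -(ep.toList.length : Int) ≤ x ∧ x < (ep.toList.length : Int)
instance (ep : String) (x : Int) : Decidable (Pre_contagem_barra_2 ep x) := by
  unfold Pre_contagem_barra_2; infer_instance
def pvWitness_contagem_barra_2 : String × Int := ("a)b", 1)

-- Bool scan used by D_ (kept Bool so the region is cheap to decide on large literals)
def pvHasClose : List Char → Bool
  | [] => false
  | c :: cs => c == ')' || pvHasClose cs

-- For -len(ep) ≤ x < 0 with ')' in ep, A's negative-index wraparound counts the tail ep[x:]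
-- and then the whole string again; B returns the intended count of ')' in ep[x:] only.
def D_contagem_barra_2 (ep : String) (x : Int) : Prop := x < 0 ∧ pvHasClose ep.toList = true
instance (ep : String) (x : Int) : Decidable (D_contagem_barra_2 ep x) := by
  unfold D_contagem_barra_2; infer_instance

def Spec_contagem_barra_2 (ep : String) (x : Int) (out : Int) : Prop :=
  ¬ D_contagem_barra_2 ep x → out = contagem_barra_2_alt ep x
instance (ep : String) (x : Int) (out : Int) : Decidable (Spec_contagem_barra_2 ep x out) := by
  unfold Spec_contagem_barra_2; infer_instance

def pvDiffWitness_contagem_barra_2 : String × Int := (")a", -1)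
def pvDiffWitnessOut_contagem_barra_2 : Int × Int := (1, 0)

-- ===== CLAIM (what is proved, stated in full; the proofs are below) =====
def Claim_unchanged_contagem_barra_2 : Prop := ∀ (ep : String) (x : Int), Dom_contagem_barra_2 ep x → Pre_contagem_barra_2 ep x → Spec_contagem_barra_2 ep x (contagem_barra_2 ep x)
def Claim_changed_contagem_barra_2 : Prop := Dom_contagem_barra_2 (pvDiffWitness_contagem_barra_2.1) (pvDiffWitness_contagem_barra_2.2) ∧ Pre_contagem_barra_2 (pvDiffWitness_contagem_barra_2.1) (pvDiffWitness_contagem_barra_2.2) ∧ D_contagem_barra_2 (pvDiffWitness_contagem_barra_2.1) (pvDiffWitness_contagem_barra_2.2) ∧ contagem_barra_2 (pvDiffWitness_contagem_barra_2.1) (pvDiffWitness_contagem_barra_2.2) = pvDiffWitnessOut_contagem_barra_2.1 ∧ contagem_barra_2_alt (pvDiffWitness_contagem_barra_2.1) (pvDiffWitness_contagem_barra_2.2) = pvDiffWitnessOut_contagem_barra_2.2 ∧ pvDiffWitnessOut_contagem_barra_2.1 ≠ pvDiffWitnessOut_contagem_barra_2.2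
def Claim_exact_contagem_barra_2 : Prop := ∀ (ep : String) (x : Int), Dom_contagem_barra_2 ep x → Pre_contagem_barra_2 ep x → D_contagem_barra_2 ep x → contagem_barra_2 ep x ≠ contagem_barra_2_alt ep x

-- ===== LEMMAS AND PROOFS =====

theorem pvHasClose_iff (l : List Char) : pvHasClose l = true ↔ ')' ∈ l := by
  induction l with
  | nil => simp [pvHasClose]
  | cons c cs ih =>
    simp only [pvHasClose, Bool.or_eq_true, beq_iff_eq, ih, List.mem_cons]
    exact or_congr ⟨Eq.symm, Eq.symm⟩ Iff.rfl

-- A's recursion from a nonnegative in-range start counts ')' in the suffix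
theorem pvGoA_nonneg (ep : List Char) (fuel n : Nat) (hn : n < ep.length)
    (hf : ep.length - n ≤ fuel) :
    pvGoA ep fuel (n : Int) = ((ep.drop n).count ')' : Int) := by
  induction fuel generalizing n with
  | zero => omega
  | succ f ih =>
    have hdrop : ep.drop n = ep[n] :: ep.drop (n + 1) := List.drop_eq_getElem_cons hn
    have hget : PySem.List.pyGet? ep (n : Int) = some ep[n] := by
      rw [PySem.List.pyGet?_natCast]
      exact List.getElem?_eq_getElem hn
    by_cases hlast : n = ep.length - 1
    · have hE : (n : Int) = (ep.length : Int) - 1 := by omega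
      have hd2 : ep.drop (n + 1) = [] := List.drop_eq_nil_of_le (by omega)
      simp only [pvGoA, if_pos hE, hget]
      rw [hdrop, hd2]
      by_cases hc : ep[n] = ')' <;> simp [hc]
    · have hne : (n : Int) ≠ (ep.length : Int) - 1 := by omega
      have hlt : n + 1 < ep.length := by omega
      have hcast : ((n : Int) + 1) = (((n + 1 : Nat)) : Int) := by push_cast; ring
      simp only [pvGoA, if_neg hne, hget]
      rw [hcast, ih (n + 1) hlt (by omega), hdrop, List.count_cons]
      by_cases hc : ep[n] = ')' <;> simp [hc] <;> omega

-- A's recursion from a negative in-range start counts the tail and then the whole list again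
theorem pvGoA_neg (ep : List Char) (fuel k : Nat) (hk1 : 1 ≤ k) (hk2 : k ≤ ep.length)
    (hf : k + ep.length ≤ fuel) :
    pvGoA ep fuel (-(k : Int)) = ((ep.drop (ep.length - k)).count ')' : Int) + (ep.count ')' : Int) := by
  induction k generalizing fuel with
  | zero => omega
  | succ k ih =>
    obtain ⟨f, rfl⟩ : ∃ f, fuel = f + 1 := ⟨fuel - 1, by omega⟩
    have hlen : 0 < ep.length := by omega
    have hne : (-((k + 1 : Nat) : Int)) ≠ (ep.length : Int) - 1 := by push_cast; omega
    have hidx : ep.length - (k + 1) < ep.length := by omega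
    have hget : PySem.List.pyGet? ep (-((k + 1 : Nat) : Int)) = some ep[ep.length - (k + 1)] := by
      rw [PySem.List.pyGet?_neg_natCast ep (k + 1) (by omega) (by omega)]
      exact List.getElem?_eq_getElem hidx
    have hdrop : ep.drop (ep.length - (k + 1)) = ep[ep.length - (k + 1)] :: ep.drop (ep.length - k) := by
      rw [List.drop_eq_getElem_cons hidx, show ep.length - (k + 1) + 1 = ep.length - k by omega]
    simp only [pvGoA, if_neg hne, hget]
    by_cases hk0 : k = 0
    · subst hk0
      have hE : (-((1 : Nat) : Int)) + 1 = ((0 : Nat) : Int) := by norm_num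
      rw [hE, pvGoA_nonneg ep f 0 hlen (by omega)]
      have hd : ep.drop (ep.length - 0) = [] := by
        rw [show ep.length - 0 = ep.length by omega]
        exact List.drop_length
      rw [List.drop_zero, hdrop, hd, List.count_cons]
      by_cases hc : ep[ep.length - (0 + 1)] = ')' <;> simp [hc] <;> omega
    · have hE : (-((k + 1 : Nat) : Int)) + 1 = -((k : Nat) : Int) := by push_cast; ring
      rw [hE, ih f (by omega) (by omega) (by omega), hdrop, List.count_cons]
      by_cases hc : ep[ep.length - (k + 1)] = ')' <;> simp [hc] <;> omega

-- B's slice from an in-range start is the corresponding suffix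
theorem alt_eq_drop_nonneg (ep : String) (x : Int) (hx : 0 ≤ x) :
    contagem_barra_2_alt ep x = ((ep.toList.drop x.toNat).count ')' : Int) := by
  unfold contagem_barra_2_alt
  rw [PySem.List.slice_from ep.toList hx]

theorem alt_eq_drop_neg (ep : String) (k : Nat) (hk : 0 < k) :
    contagem_barra_2_alt ep (-(k : Int)) = ((ep.toList.drop (ep.toList.length - k)).count ')' : Int) := by
  unfold contagem_barra_2_alt
  rw [PySem.List.slice_from_neg_natCast ep.toList k hk]

-- ===== VERDICT (by name: the statement is the Claim_ definition above) =====
theorem contagem_barra_2_spec : Claim_unchanged_contagem_barra_2 := by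
  unfold Claim_unchanged_contagem_barra_2
  intro ep x _ hpre hnd
  unfold Pre_contagem_barra_2 at hpre
  unfold D_contagem_barra_2 at hnd
  unfold contagem_barra_2
  by_cases hx : 0 ≤ x
  · obtain ⟨n, rfl⟩ : ∃ n : Nat, x = (n : Int) := ⟨x.toNat, by omega⟩
    rw [pvGoA_nonneg ep.toList _ n (by omega) (by omega)]
    rw [alt_eq_drop_nonneg ep n (by omega)]
    simp
  · have hmem : ')' ∉ ep.toList := fun h => hnd ⟨by omega, (pvHasClose_iff _).mpr h⟩
    obtain ⟨k, hk⟩ : ∃ k : Nat, x = -(k : Int) := ⟨(-x).toNat, by omega⟩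
    subst hk
    rw [pvGoA_neg ep.toList _ k (by omega) (by omega) (by omega)]
    rw [alt_eq_drop_neg ep k (by omega)]
    have h1 : ep.toList.count ')' = 0 := List.count_eq_zero.mpr hmem
    simp [h1]

theorem contagem_barra_2_changed : Claim_changed_contagem_barra_2 := by
  unfold Claim_changed_contagem_barra_2; decide

theorem contagem_barra_2_tight : Claim_exact_contagem_barra_2 := by
  unfold Claim_exact_contagem_barra_2
  intro ep x _ hpre hd
  unfold Pre_contagem_barra_2 at hpre
  obtain ⟨hx, hmemb⟩ := hd
  have hmem : ')' ∈ ep.toList := (pvHasClose_iff _).mp hmemb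
  obtain ⟨k, hk⟩ : ∃ k : Nat, x = -(k : Int) := ⟨(-x).toNat, by omega⟩
  subst hk
  unfold contagem_barra_2
  rw [pvGoA_neg ep.toList _ k (by omega) (by omega) (by omega)]
  rw [alt_eq_drop_neg ep k (by omega)]
  have h1 : 0 < ep.toList.count ')' := List.count_pos_iff.mpr hmem
  omega
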